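-- pv_equiv track=rewrite | github.com/rahulkhand/pacman | game/graphAndNodes.py | detNode
-- ===== SOURCE A (Python) =====
-- def notOnBoard(row, col, board):
--     rows = len(board)
--     cols = len(board[0])
--     if row < 0 or col < 0 or row >= rows or col >= cols:    return True
--     else:   return False
--
-- def detNode(board, row, col, path):
--     nodeDirs = set()
--     sumRow, sumCol = 0, 0
--     dirs = {(-1, 0), (1, 0), (0, -1), (0, 1)}
--     for direction in dirs:
--         nRow, nCol = row + direction[0], col + direction[1]
--         if notOnBoard(nRow, nCol, board):   continue
--         elif board[nRow][nCol] == path: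
--             nodeDirs.add(direction)
--             sumRow += direction[0]
--             sumCol += direction[1]
--
--     if len(nodeDirs) > 2:   return True
--     elif len(nodeDirs) == 2:
--         if (sumRow, sumCol) != (0, 0):  return True
--     return False
-- ===== SOURCE B (Python) =====
-- def notOnBoard(row, col, board):
--     rows = len(board)
--     cols = len(board[0])
--     if row < 0 or col < 0 or row >= rows or col >= cols:    return True
--     else:   return False
--
-- def detNode(board, row, col, path):
--     def ok(r, c):
--         return not notOnBoard(r, c, board) and board[r][c] == path
--     up, down = ok(row - 1, col), ok(row + 1, col)
--     left, right = ok(row, col - 1), ok(row, col + 1)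
--     return (up or down) and (left or right)
-- ===== Notes on version B (the rewrite author's own statement) =====
-- stated objective: simpler
-- what changed: Replaces the loop over a direction set with accumulated set/sum and count>2 / perpendicular-sum branching by four direct neighbor tests and the closed-form boolean (up or down) and (left or right).
import Mathlib
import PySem

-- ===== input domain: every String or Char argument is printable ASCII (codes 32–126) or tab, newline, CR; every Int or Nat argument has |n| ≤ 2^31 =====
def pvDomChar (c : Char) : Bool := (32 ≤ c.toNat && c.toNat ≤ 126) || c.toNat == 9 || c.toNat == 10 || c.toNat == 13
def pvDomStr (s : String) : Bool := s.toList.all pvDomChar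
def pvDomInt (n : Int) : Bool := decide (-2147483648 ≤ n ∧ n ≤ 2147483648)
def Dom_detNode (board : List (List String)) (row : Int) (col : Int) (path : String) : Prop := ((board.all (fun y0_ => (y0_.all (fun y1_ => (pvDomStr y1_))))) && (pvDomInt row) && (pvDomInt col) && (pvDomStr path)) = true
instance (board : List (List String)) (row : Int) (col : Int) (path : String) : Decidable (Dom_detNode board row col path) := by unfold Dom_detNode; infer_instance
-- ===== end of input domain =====

-- B replaces A's direction-set loop with accumulated set and vector sum by four direct
-- neighbor tests and the closed form (up ∨ down) ∧ (left ∨ right); objective: simpler.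

-- ===== PORT A =====
def notOnBoardL (row : Int) (col : Int) (board : List (List String)) : Bool :=
  let rows : Int := board.length
  let cols : Int := (board.headD []).length
  if row < 0 || col < 0 || row ≥ rows || col ≥ cols then true else false

def detStep (board : List (List String)) (row : Int) (col : Int) (path : String)
    (st : PySem.Set (Int × Int) × Int × Int) (d : Int × Int) :
    PySem.Set (Int × Int) × Int × Int :=
  let nRow := row + d.1
  let nCol := col + d.2
  if notOnBoardL nRow nCol board then st
  else
    match PySem.List.pyGet? board nRow with
    | none => st
    | some rw =>
      match PySem.List.pyGet? rw nCol with
      | none => st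
      | some cell =>
        if cell == path then (PySem.Set.add st.1 d, st.2.1 + d.1, st.2.2 + d.2) else st

def detNode (board : List (List String)) (row : Int) (col : Int) (path : String) : Bool :=
  let dirs : List (Int × Int) := [(-1, 0), (1, 0), (0, -1), (0, 1)]
  let r := dirs.foldl (detStep board row col path) (PySem.Set.empty, 0, 0)
  if PySem.Set.len r.1 > 2 then true
  else if PySem.Set.len r.1 == 2 then
    (if (r.2.1, r.2.2) ≠ ((0 : Int), (0 : Int)) then true else false)
  else false

-- ===== PORT B =====
def okNbr (board : List (List String)) (r : Int) (c : Int) (path : String) : Bool :=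
  if notOnBoardL r c board then false
  else
    match PySem.List.pyGet? board r with
    | none => false
    | some rw =>
      match PySem.List.pyGet? rw c with
      | none => false
      | some cell => cell == path

def detNode_alt (board : List (List String)) (row : Int) (col : Int) (path : String) : Bool :=
  (okNbr board (row - 1) col path || okNbr board (row + 1) col path) &&
  (okNbr board row (col - 1) path || okNbr board row (col + 1) path)

-- ===== PRECONDITION & SPEC =====
-- Pre_ excludes exactly the inputs where Python A raises IndexError: the empty board
-- (len(board[0])), and boards where a neighbor cell that notOnBoard lets through lies
-- beyond the end of its (shorter, ragged) row.
def Pre_detNode (board : List (List String)) (row : Int) (col : Int) (path : String) : Prop :=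
  board ≠ [] ∧ ∀ d ∈ ([(-1, 0), (1, 0), (0, -1), (0, 1)] : List (Int × Int)),
    (0 ≤ row + d.1 ∧ row + d.1 < board.length ∧ 0 ≤ col + d.2 ∧ col + d.2 < (board.headD []).length) →
      col + d.2 < ((board.getD (row + d.1).toNat []).length : Int)
instance (board : List (List String)) (row : Int) (col : Int) (path : String) : Decidable (Pre_detNode board row col path) := by unfold Pre_detNode; infer_instance
def pvWitness_detNode : List (List String) × Int × Int × String := ([[".", "."], [".", "."]], 0, 0, ".")

def Spec_detNode (board : List (List String)) (row : Int) (col : Int) (path : String) (out : Bool) : Prop := out = detNode_alt board row col path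
instance (board : List (List String)) (row : Int) (col : Int) (path : String) (out : Bool) : Decidable (Spec_detNode board row col path out) := by unfold Spec_detNode; infer_instance

-- ===== CLAIM (what is proved, stated in full; the proofs are below) =====
def Claim_equal_detNode : Prop := ∀ (board : List (List String)) (row : Int) (col : Int) (path : String), Dom_detNode board row col path → Pre_detNode board row col path → Spec_detNode board row col path (detNode board row col path)

-- ===== LEMMAS AND PROOFS =====
lemma detStep_eq (board : List (List String)) (row col : Int) (path : String)
    (st : PySem.Set (Int × Int) × Int × Int) (d : Int × Int) :
    detStep board row col path st d =
      if okNbr board (row + d.1) (col + d.2) path then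
        (PySem.Set.add st.1 d, st.2.1 + d.1, st.2.2 + d.2)
      else st := by
  unfold detStep okNbr
  by_cases h : notOnBoardL (row + d.1) (col + d.2) board
  · simp [h]
  · simp only [h, if_false, Bool.false_eq_true]
    cases hg : PySem.List.pyGet? board (row + d.1) with
    | none => simp
    | some rw =>
      cases hc : PySem.List.pyGet? rw (col + d.2) with
      | none => simp [hc]
      | some cell => simp [hc]

theorem detNode_spec : Claim_equal_detNode := by
  intro board row col path _ _
  unfold Spec_detNode detNode detNode_alt
  simp only [List.foldl, detStep_eq]
  have e1 : row + (-1 : Int) = row - 1 := by ring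
  have e2 : col + (-1 : Int) = col - 1 := by ring
  have e3 : row + (0 : Int) = row := by ring
  have e4 : col + (0 : Int) = col := by ring
  simp only [e1, e2, e3, e4]
  by_cases h1 : okNbr board (row - 1) col path <;>
  by_cases h2 : okNbr board (row + 1) col path <;>
  by_cases h3 : okNbr board row (col - 1) path <;>
  by_cases h4 : okNbr board row (col + 1) path <;>
    simp [h1, h2, h3, h4]
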